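-- pv_equiv track=rewrite | github.com/baarti20/Python- | secretNumMsg.py | secret_message
-- ===== SOURCE A (Python) =====
-- def secret_message(message):
--     """
--     This function takes a string and returns a secret message
--     by replacing characters with numbers and separating them with hyphens.
--     """
--     secret = ''
--     for char in message:
--         if char.isalpha():
--             if char.islower():
--                 secret += str(ord(char) - ord('a') + 1) + '-'
--             else:
--                 secret += str(ord(char) - ord('A') + 1) + '-'
--         elif char == " ":
--             if secret.endswith('-'):
--                 secret = secret[:-1]
--             secret += ' '
--
--     # Remove any trailing hyphen at the end of the string
--     if secret.endswith('-'):
--         secret = secret[:-1]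
--
--     return secret
-- ===== SOURCE B (Python) =====
-- def secret_message(message):
--     """
--     This function takes a string and returns a secret message
--     by replacing characters with numbers and separating them with hyphens.
--     """
--     filtered = [c for c in message if c.isalpha() or c == ' ']
--     parts = []
--     i = 0
--     n = len(filtered)
--     while i < n:
--         j = i
--         if filtered[i] == ' ':
--             while j < n and filtered[j] == ' ':
--                 j += 1
--             parts.append(' ' * (j - i))
--         else:
--             while j < n and filtered[j] != ' ':
--                 j += 1
--             parts.append('-'.join(str(ord(c) - 96) if c.islower() else str(ord(c) - 64)
--                                   for c in filtered[i:j]))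
--         i = j
--     return ''.join(parts)
-- ===== Notes on version B (the rewrite author's own statement) =====
-- stated objective: alternative
-- what changed: A builds the output incrementally character by character, repeatedly stripping a trailing hyphen when a space arrives and once more at the end; B first filters the message to letters and spaces, then splits it into maximal runs and emits each letter run with a single hyphen-join, concatenating the parts.
import Mathlib
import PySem

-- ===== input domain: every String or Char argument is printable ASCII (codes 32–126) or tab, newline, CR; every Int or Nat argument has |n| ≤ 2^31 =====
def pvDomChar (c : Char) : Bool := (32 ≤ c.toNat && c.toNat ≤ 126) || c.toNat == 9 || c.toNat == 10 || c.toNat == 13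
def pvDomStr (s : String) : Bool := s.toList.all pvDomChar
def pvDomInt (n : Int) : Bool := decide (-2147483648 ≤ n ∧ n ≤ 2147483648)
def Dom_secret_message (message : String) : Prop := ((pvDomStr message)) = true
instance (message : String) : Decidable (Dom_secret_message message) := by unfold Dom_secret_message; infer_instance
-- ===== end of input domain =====

-- B replaces A's incremental string building with trailing-hyphen fix-ups by a
-- filter-then-group pass: keep letters and spaces, encode each maximal letter run
-- with '-'.join, concatenate runs (objective: alternative, a tokenize-then-join decomposition).

-- ===== PORT A =====
-- secret.endswith('-') / secret[:-1] (strip one trailing hyphen)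
def stripHyphen (s : List Char) : List Char :=
  if PySem.Chars.endswith s ['-'] then s.dropLast else s

-- the body of A's for-loop over the characters
def aStep (secret : List Char) (char : Char) : List Char :=
  if PySem.Chars.isalpha char then
    if PySem.Chars.islower char then
      secret ++ PySem.Int.toChars ((char.toNat : Int) - ('a'.toNat : Int) + 1) ++ ['-']
    else
      secret ++ PySem.Int.toChars ((char.toNat : Int) - ('A'.toNat : Int) + 1) ++ ['-']
  else if char == ' ' then
    stripHyphen secret ++ [' ']
  else
    secret

def secret_message (message : String) : String :=
  String.mk (stripHyphen (List.foldl aStep [] message.toList))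

-- ===== PORT B =====
-- str(ord(c) - 96) if c.islower() else str(ord(c) - 64)
def numB (c : Char) : List Char :=
  if PySem.Chars.islower c then PySem.Int.toChars ((c.toNat : Int) - 96)
  else PySem.Int.toChars ((c.toNat : Int) - 64)

-- c.isalpha() or c == ' '
def keepB (c : Char) : Bool := PySem.Chars.isalpha c || c == ' '

-- the grouping loop of Source B: peel one maximal run (of spaces, or of non-spaces) at a time
def bGroups : List Char → List Char
  | [] => []
  | c :: rest =>
    if c == ' ' then
      (c :: rest.takeWhile (· == ' ')) ++ bGroups (rest.dropWhile (· == ' '))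
    else
      PySem.Chars.join ['-'] ((c :: rest.takeWhile (fun d => !(d == ' '))).map numB)
        ++ bGroups (rest.dropWhile (fun d => !(d == ' ')))
termination_by l => l.length
decreasing_by
  · have := List.length_dropWhile_le (p := (· == ' ')) (l := rest); simp; omega
  · have := List.length_dropWhile_le (p := fun d => !(d == ' ')) (l := rest); simp; omega

def secret_message_alt (message : String) : String :=
  String.mk (bGroups (message.toList.filter keepB))

-- ===== PRECONDITION & SPEC =====
def Spec_secret_message (message : String) (out : String) : Prop := out = secret_message_alt message
instance (message : String) (out : String) : Decidable (Spec_secret_message message out) := by unfold Spec_secret_message; infer_instance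

-- ===== CLAIM (what is proved, stated in full; the proofs are below) =====
def Claim_equal_secret_message : Prop := ∀ (message : String), Dom_secret_message message → Spec_secret_message message (secret_message message)

-- ===== LEMMAS AND PROOFS =====

-- reference shape of the output on an already-filtered list: `pending` records
-- whether the previous kept character was a letter (so a separator is due)
def gSpec (pending : Bool) : List Char → List Char
  | [] => []
  | c :: rest =>
    if PySem.Chars.isalpha c then
      (if pending then ['-'] else []) ++ numB c ++ gSpec true rest
    else
      ' ' :: gSpec false rest

theorem endswith_hyphen_iff (s : List Char) :
    PySem.Chars.endswith s ['-'] = true ↔ s.getLast? = some '-' := by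
  rw [PySem.Chars.endswith_iff]
  constructor
  · rintro ⟨t, rfl⟩
    rw [List.getLast?_append_of_ne_nil t (by simp)]; rfl
  · intro h
    have hne : s ≠ [] := by rintro rfl; simp at h
    refine ⟨s.dropLast, ?_⟩
    have h2 := List.dropLast_append_getLast hne
    rwa [show s.getLast hne = '-' by
      have := List.getLast?_eq_getLast (l := s) hne
      rw [this] at h; exact Option.some.inj h] at h2

theorem aStep_alpha (s : List Char) (c : Char) (h : PySem.Chars.isalpha c = true) :
    aStep s c = s ++ numB c ++ ['-'] := by
  have h97 : ('a'.toNat : Int) = 97 := by decide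
  have h65 : ('A'.toNat : Int) = 65 := by decide
  unfold aStep numB
  rw [if_pos h]
  by_cases hl : PySem.Chars.islower c = true
  · rw [if_pos hl, if_pos hl,
      show (c.toNat : Int) - ('a'.toNat : Int) + 1 = (c.toNat : Int) - 96 by rw [h97]; ring,
      List.append_assoc]
  · rw [if_neg hl, if_neg hl,
      show (c.toNat : Int) - ('A'.toNat : Int) + 1 = (c.toNat : Int) - 64 by rw [h65]; ring,
      List.append_assoc]

theorem numB_facts (c : Char) (h : PySem.Chars.isalpha c = true) :
    numB c ≠ [] ∧ (numB c).getLast? ≠ some '-' := by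
  unfold numB
  rcases Bool.or_eq_true_iff.mp (by simpa [PySem.Chars.isalpha] using h) with hu | hl
  · obtain ⟨h1, h2⟩ : 65 ≤ c.toNat ∧ c.toNat ≤ 90 := by
      simpa only [PySem.Chars.isupper, Bool.and_eq_true, decide_eq_true_eq, Char.le_def,
        UInt32.le_iff_toNat_le] using hu
    have hl' : PySem.Chars.islower c = false := by
      simp only [PySem.Chars.islower, Bool.and_eq_true, decide_eq_true_eq, Char.le_def,
        UInt32.le_iff_toNat_le, Bool.and_eq_false_iff, decide_eq_false_iff_not, not_le]
      left
      show c.val.toNat < 'a'.val.toNat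
      show c.toNat < 97
      omega
    rw [hl']
    simp only [Bool.false_eq_true, if_false]
    obtain ⟨g1, g2⟩ : 1 ≤ (c.toNat : Int) - 64 ∧ (c.toNat : Int) - 64 ≤ 26 := by omega
    set n := (c.toNat : Int) - 64 with hn
    interval_cases n <;> decide
  · obtain ⟨h1, h2⟩ : 97 ≤ c.toNat ∧ c.toNat ≤ 122 := by
      simpa only [PySem.Chars.islower, Bool.and_eq_true, decide_eq_true_eq, Char.le_def,
        UInt32.le_iff_toNat_le] using hl
    rw [hl, if_pos rfl]
    obtain ⟨g1, g2⟩ : 1 ≤ (c.toNat : Int) - 96 ∧ (c.toNat : Int) - 96 ≤ 26 := by omega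
    set n := (c.toNat : Int) - 96 with hn
    interval_cases n <;> decide

theorem stripHyphen_append (a x : List Char) (h : x = [] → a.getLast? ≠ some '-') :
    stripHyphen (a ++ x) = a ++ stripHyphen x := by
  cases x with
  | nil =>
    have h := h rfl
    simp only [List.append_nil]
    have : PySem.Chars.endswith a ['-'] = false := by
      rw [Bool.eq_false_iff]; intro hc; exact h ((endswith_hyphen_iff a).mp hc)
    simp [stripHyphen, this]
  | cons y ys =>
    unfold stripHyphen
    have hne : y :: ys ≠ [] := by simp
    have hlast : (a ++ y :: ys).getLast? = (y :: ys).getLast? :=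
      List.getLast?_append_of_ne_nil a hne
    by_cases he : PySem.Chars.endswith (y :: ys) ['-'] = true
    · have : PySem.Chars.endswith (a ++ y :: ys) ['-'] = true := by
        rw [endswith_hyphen_iff, hlast, ← endswith_hyphen_iff]; exact he
      rw [if_pos this, if_pos he, List.dropLast_append_of_ne_nil hne]
    · have : ¬ PySem.Chars.endswith (a ++ y :: ys) ['-'] = true := by
        rw [endswith_hyphen_iff, hlast, ← endswith_hyphen_iff]; exact he
      rw [if_neg this, if_neg he]

theorem foldl_aStep_append (l : List Char) : ∀ a s : List Char,
    (s = [] → a.getLast? ≠ some '-') →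
    List.foldl aStep (a ++ s) l = a ++ List.foldl aStep s l := by
  induction l with
  | nil => intro a s _; rfl
  | cons c r ih =>
    intro a s hs
    rw [List.foldl_cons, List.foldl_cons]
    by_cases ha : PySem.Chars.isalpha c = true
    · rw [aStep_alpha _ _ ha, aStep_alpha s c ha,
        show a ++ s ++ numB c ++ ['-'] = a ++ (s ++ numB c ++ ['-']) by simp,
        ih a (s ++ numB c ++ ['-']) (by intro h; simp at h)]
    · by_cases hc : c = ' '
      · subst hc
        cases s with
        | nil =>
          have hend : PySem.Chars.endswith a ['-'] = false := by
            rw [Bool.eq_false_iff]; intro hcon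
            exact (hs rfl) ((endswith_hyphen_iff a).mp hcon)
          have e1 : aStep (a ++ []) ' ' = a ++ [' '] := by
            simp [aStep, ha, stripHyphen, hend]
          have e2 : aStep [] ' ' = [' '] := by decide
          rw [e1, e2]
          exact ih a [' '] (by simp)
        | cons y ys =>
          have e1 : aStep (a ++ y :: ys) ' ' = a ++ aStep (y :: ys) ' ' := by
            simp only [aStep, ha, Bool.false_eq_true, if_false]
            rw [stripHyphen_append a (y :: ys) (by intro hcon; simp at hcon), List.append_assoc]
            simp
          rw [e1, ih a (aStep (y :: ys) ' ') (by
            intro hcon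
            simp [aStep, ha] at hcon)]
      · have : aStep (a ++ s) c = a ++ s ∧ aStep s c = s := by
          constructor <;> simp [aStep, ha, hc]
        rw [this.1, this.2]; exact ih a s hs

theorem keepB_not_alpha {c : Char} (hk : keepB c = true) (ha : ¬ PySem.Chars.isalpha c = true) :
    c = ' ' := by
  simp only [keepB, Bool.or_eq_true, beq_iff_eq] at hk
  tauto

theorem A_chars (l : List Char) : (∀ c ∈ l, keepB c = true) → ∀ pending : Bool,
    stripHyphen (List.foldl aStep (if pending then ['-'] else []) l) = gSpec pending l := by
  induction l with
  | nil => intro _ pending; cases pending <;> decide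
  | cons c r ih =>
    intro hk pending
    have hkc : keepB c = true := hk c (List.mem_cons_self)
    have hkr : ∀ d ∈ r, keepB d = true := fun d hd => hk d (List.mem_cons_of_mem _ hd)
    by_cases ha : PySem.Chars.isalpha c = true
    · obtain ⟨hne, hlast⟩ := numB_facts c ha
      rw [List.foldl_cons, aStep_alpha _ _ ha,
        foldl_aStep_append r ((if pending then ['-'] else []) ++ numB c) ['-'] (by simp),
        stripHyphen_append _ _ (fun _ => by
          rw [List.getLast?_append_of_ne_nil _ hne]; exact hlast)]
      have ihr := ih hkr true
      rw [show (if (true : Bool) then ['-'] else []) = ['-'] from rfl] at ihr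
      rw [ihr]
      simp [gSpec, ha]
    · have hc : c = ' ' := keepB_not_alpha hkc ha
      subst hc
      have e : aStep (if pending then ['-'] else []) ' ' = [' '] := by
        cases pending <;> decide
      rw [List.foldl_cons, e,
        show List.foldl aStep [' '] r = [' '] ++ List.foldl aStep [] r from by
          simpa using foldl_aStep_append r [' '] [] (by intro _; decide),
        stripHyphen_append [' '] _ (by intro _; decide)]
      have ihr := ih hkr false
      rw [show (if (false : Bool) then ['-'] else []) = ([] : List Char) from rfl] at ihr
      rw [ihr]
      simp [gSpec, show PySem.Chars.isalpha ' ' = false from by decide]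

theorem gspec_spaces (t : List Char) (ht : ∀ c ∈ t, c = ' ') (hne : t ≠ []) :
    ∀ (rest : List Char) (b : Bool), gSpec b (t ++ rest) = t ++ gSpec false rest := by
  induction t with
  | nil => exact absurd rfl hne
  | cons c t' ih =>
    intro rest b
    have hc : c = ' ' := ht c (List.mem_cons_self)
    subst hc
    rw [List.cons_append,
      show gSpec b (' ' :: (t' ++ rest)) = ' ' :: gSpec false (t' ++ rest) from by
        simp [gSpec, show PySem.Chars.isalpha ' ' = false from by decide]]
    cases t' with
    | nil => simp
    | cons d t'' =>
      rw [ih (fun x hx => ht x (List.mem_cons_of_mem _ hx)) (by simp) rest false]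
      simp

theorem gspec_letters (t : List Char) (ht : ∀ c ∈ t, PySem.Chars.isalpha c = true)
    (hne : t ≠ []) : ∀ (rest : List Char) (b : Bool),
    gSpec b (t ++ rest) =
      (if b then ['-'] else []) ++ PySem.Chars.join ['-'] (t.map numB) ++ gSpec true rest := by
  induction t with
  | nil => exact absurd rfl hne
  | cons c t' ih =>
    intro rest b
    have hc : PySem.Chars.isalpha c = true := ht c (List.mem_cons_self)
    rw [List.cons_append,
      show gSpec b (c :: (t' ++ rest))
          = (if b then ['-'] else []) ++ numB c ++ gSpec true (t' ++ rest) from by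
        simp [gSpec, hc]]
    cases t' with
    | nil => simp [PySem.Chars.join_singleton]
    | cons d t'' =>
      rw [ih (fun x hx => ht x (List.mem_cons_of_mem _ hx)) (by simp) rest true]
      simp [PySem.Chars.join_cons_cons]

theorem gspec_pending_irrel (rest : List Char)
    (h : ∀ c, rest.head? = some c → PySem.Chars.isalpha c = false) :
    gSpec true rest = gSpec false rest := by
  cases rest with
  | nil => rfl
  | cons c t =>
    have hc : PySem.Chars.isalpha c = false := h c rfl
    simp [gSpec, hc]

theorem dropWhile_head_false {p : Char → Bool} {r : List Char} {d : Char} {t : List Char}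
    (hd : r.dropWhile p = d :: t) : p d = false := by
  induction r with
  | nil => simp at hd
  | cons a r ih =>
    rw [List.dropWhile_cons] at hd
    by_cases h : p a = true
    · exact ih (by simpa [h] using hd)
    · simp only [h, if_false, Bool.false_eq_true, List.cons.injEq] at hd
      rw [← hd.1]
      simpa using h

theorem B_chars_bounded (n : Nat) : ∀ l : List Char, l.length ≤ n →
    (∀ c ∈ l, keepB c = true) → bGroups l = gSpec false l := by
  induction n with
  | zero =>
    intro l hlen _
    rw [List.length_eq_zero_iff.mp (Nat.le_zero.mp hlen), bGroups]
    simp [gSpec]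
  | succ n ih =>
    intro l hlen hk
    cases l with
    | nil => rw [bGroups]; simp [gSpec]
    | cons c r =>
      have hkc : keepB c = true := hk c (List.mem_cons_self)
      have hkr : ∀ d ∈ r, keepB d = true := fun d hd => hk d (List.mem_cons_of_mem _ hd)
      by_cases hc : c = ' '
      · subst hc
        rw [bGroups, if_pos (by decide)]
        have hrest := ih (r.dropWhile (· == ' '))
          (le_trans (List.length_dropWhile_le _ _) (Nat.le_of_succ_le_succ hlen))
          (fun d hd => hkr d ((List.dropWhile_sublist _).subset hd))
        rw [hrest]
        have hsp : ∀ x ∈ ' ' :: r.takeWhile (· == ' '), x = ' ' := by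
          intro x hx
          rcases List.mem_cons.mp hx with h | h
          · exact h
          · exact beq_iff_eq.mp (List.mem_takeWhile_imp (p := (· == ' ')) h)
        rw [← gspec_spaces (' ' :: r.takeWhile (· == ' ')) hsp (by simp)
            (r.dropWhile (· == ' ')) false]
        rw [List.cons_append, List.takeWhile_append_dropWhile]
      · have ha : PySem.Chars.isalpha c = true := by
          simp only [keepB, Bool.or_eq_true, beq_iff_eq] at hkc
          tauto
        rw [bGroups, if_neg (by simpa using hc)]
        have hrest := ih (r.dropWhile (fun d => !(d == ' ')))
          (le_trans (List.length_dropWhile_le _ _) (Nat.le_of_succ_le_succ hlen))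
          (fun d hd => hkr d ((List.dropWhile_sublist _).subset hd))
        rw [hrest]
        have hlet : ∀ x ∈ c :: r.takeWhile (fun d => !(d == ' ')),
            PySem.Chars.isalpha x = true := by
          intro x hx
          rcases List.mem_cons.mp hx with h | h
          · subst h; exact ha
          · have hx' : (!(x == ' ')) = true := List.mem_takeWhile_imp (p := fun d => !(d == ' ')) h
            have hxr : x ∈ r := (List.takeWhile_sublist _).subset h
            have : x ≠ ' ' := by simpa using hx'
            simp only [keepB, Bool.or_eq_true, beq_iff_eq] at hkr
            rcases hkr x hxr with h' | h'
            · exact h'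
            · exact absurd h' this
        have hpend : gSpec true (r.dropWhile (fun d => !(d == ' ')))
            = gSpec false (r.dropWhile (fun d => !(d == ' '))) := by
          apply gspec_pending_irrel
          intro d hd
          cases hdw : r.dropWhile (fun d => !(d == ' ')) with
          | nil => rw [hdw] at hd; simp at hd
          | cons e t =>
            rw [hdw] at hd
            have he : e = d := by simpa using hd
            have h2 : (!(e == ' ')) = false := dropWhile_head_false hdw
            rw [← he, show e = ' ' from by simpa using h2]
            decide
        calc PySem.Chars.join ['-'] ((c :: r.takeWhile (fun d => !(d == ' '))).map numB)
              ++ gSpec false (r.dropWhile (fun d => !(d == ' ')))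
            = PySem.Chars.join ['-'] ((c :: r.takeWhile (fun d => !(d == ' '))).map numB)
              ++ gSpec true (r.dropWhile (fun d => !(d == ' '))) := by rw [hpend]
          _ = gSpec false ((c :: r.takeWhile (fun d => !(d == ' ')))
              ++ r.dropWhile (fun d => !(d == ' '))) := by
              rw [gspec_letters _ hlet (by simp)]; simp
          _ = gSpec false (c :: r) := by
              rw [List.cons_append, List.takeWhile_append_dropWhile]

theorem B_chars (l : List Char) (hk : ∀ c ∈ l, keepB c = true) : bGroups l = gSpec false l :=
  B_chars_bounded l.length l (le_refl _) hk

theorem foldl_aStep_filter (l : List Char) : ∀ acc,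
    List.foldl aStep acc l = List.foldl aStep acc (l.filter keepB) := by
  induction l with
  | nil => intro _; rfl
  | cons c r ih =>
    intro acc
    rw [List.filter_cons]
    by_cases hk : keepB c = true
    · rw [if_pos hk, List.foldl_cons, List.foldl_cons, ih]
    · have h2 : PySem.Chars.isalpha c = false ∧ (c == ' ') = false := by
        simpa [keepB] using hk
      rw [if_neg (by simpa using hk), List.foldl_cons,
        show aStep acc c = acc from by simp [aStep, h2.1, h2.2], ih]

-- ===== VERDICT (by name: the statement is the Claim_ definition above) =====
theorem secret_message_spec : Claim_equal_secret_message := by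
  intro message _
  unfold Spec_secret_message secret_message secret_message_alt
  congr 1
  rw [foldl_aStep_filter]
  rw [show stripHyphen (List.foldl aStep [] (message.toList.filter keepB))
      = stripHyphen (List.foldl aStep (if false then ['-'] else []) (message.toList.filter keepB)) by rfl]
  rw [A_chars _ (fun c hc => List.of_mem_filter hc) false,
    B_chars _ (fun c hc => List.of_mem_filter hc)]
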